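-- pv_equiv track=rewrite | github.com/Hulyamr13/hackerrank | Cut the Tree.py | tree_cut
-- ===== SOURCE A (Python) =====
-- from collections import defaultdict
--
-- def tree_cut(n, costs, edges):
--     edge_map = defaultdict(set)
--     for x, y in edges:
--         edge_map[x].add(y)
--         edge_map[y].add(x)
--
--     # Hierarchical sort
--     visited = set()
--     ordering = []
--     children = defaultdict(list)
--     stack = [1]
--     while stack:
--         node = stack.pop()
--         visited.add(node)
--         ordering.append(node)
--
--         children[node] = clist = [
--             c for c in edge_map[node]
--             if c not in visited]
--         stack.extend(clist)
--
--     subtree_costs = {}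
--     for node in reversed(ordering):
--         subtree_costs[node] = costs[node] + sum(
--             subtree_costs[c] for c in children[node])
--     total_cost = sum(costs.values())
--     return min(abs(total_cost - 2 * subc)
--                for subc in subtree_costs.values())
-- ===== SOURCE B (Python) =====
-- from collections import defaultdict
--
--
-- def tree_cut(n, costs, edges):
--     # One explicit-stack post-order DFS from node 1: compute each subtree's cost
--     # on the way back up and fold the cut candidate |total - 2*subtree| into a
--     # running minimum, instead of A's ordering/children-recording traversal plus
--     # a reverse accumulation pass plus a min pass.
--     edge_map = defaultdict(set)
--     for x, y in edges:
--         edge_map[x].add(y)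
--         edge_map[y].add(x)
--     total_cost = sum(costs.values())
--     visited = {1}
--     # frame = (node, not-yet-scanned neighbours, partial subtree cost)
--     stack = [(1, list(edge_map[1])[::-1], costs[1])]
--     best = None
--     while stack:
--         node, rem, s = stack.pop()
--         if rem:
--             c = rem.pop()
--             stack.append((node, rem, s))
--             if c not in visited:
--                 visited.add(c)
--                 stack.append((c, list(edge_map[c])[::-1], costs[c]))
--         else:
--             cut = abs(total_cost - 2 * s)
--             if best is None or cut < best:
--                 best = cut
--             if stack:
--                 pn, prem, ps = stack.pop()
--                 stack.append((pn, prem, ps + s))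
--     return best
-- ===== Notes on version B (the rewrite author's own statement) =====
-- stated objective: faster
-- what changed: B replaces A's three phases (stack traversal recording ordering+children lists, then a reverse-order accumulation pass building a subtree-cost dict, then a min pass over its values) by a single post-order DFS that computes each subtree cost while unwinding and folds |total - 2*subtree| into a running minimum.
-- outside the precondition, e.g. on tree_cut(3, {1: 1, 2: 2, 3: 4}, [(1, 2), (2, 3), (3, 1)]): A returns 3, B returns 1
import Mathlib
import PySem

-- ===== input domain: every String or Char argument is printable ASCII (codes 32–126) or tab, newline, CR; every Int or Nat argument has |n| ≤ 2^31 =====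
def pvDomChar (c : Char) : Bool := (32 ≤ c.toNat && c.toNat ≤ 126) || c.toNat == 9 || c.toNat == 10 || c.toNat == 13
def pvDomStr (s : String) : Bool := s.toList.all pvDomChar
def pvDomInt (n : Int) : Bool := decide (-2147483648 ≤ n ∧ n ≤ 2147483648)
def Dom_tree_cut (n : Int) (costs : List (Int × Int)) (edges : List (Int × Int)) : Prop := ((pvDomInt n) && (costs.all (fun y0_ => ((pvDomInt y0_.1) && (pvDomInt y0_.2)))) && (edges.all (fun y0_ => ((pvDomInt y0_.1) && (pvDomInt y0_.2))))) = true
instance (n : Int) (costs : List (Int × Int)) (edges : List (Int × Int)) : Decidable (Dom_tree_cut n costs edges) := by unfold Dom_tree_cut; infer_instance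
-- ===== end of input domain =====

-- B does the same exact computation in ONE post-order DFS pass (subtree sums and the
-- running minimum of |total - 2*subtree| maintained while unwinding) instead of A's
-- traversal pass + reverse accumulation pass + min pass.

-- ===== PORT A =====
-- both Pythons start with the identical defaultdict(set) adjacency-building loop;
-- it is transliterated once here and used by both ports
def pvEdgeMap (edges : List (Int × Int)) : PySem.Dict Int (PySem.Set Int) :=
  edges.foldl
    (fun em p =>
      let em1 := em.modify p.1 PySem.Set.empty (fun s => PySem.Set.add s p.2)
      em1.modify p.2 PySem.Set.empty (fun s => PySem.Set.add s p.1))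
    PySem.Dict.empty

-- the 'while stack' loop of A; the stack is stored TOP-FIRST (Python appends/pops at the
-- right end; 'stack.pop()' = pop the head here, 'stack.extend(clist)' = clist.reverse ++ st),
-- with a fuel argument that (provably) exceeds the number of iterations
def pvLoopA (em : PySem.Dict Int (PySem.Set Int)) :
    Nat → List Int → PySem.Set Int → List Int → PySem.Dict Int (List Int) →
    PySem.Set Int × List Int × PySem.Dict Int (List Int)
  | 0, _, vis, ord, ch => (vis, ord, ch)
  | _ + 1, [], vis, ord, ch => (vis, ord, ch)
  | f + 1, v :: st, vis, ord, ch =>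
    let vis' := PySem.Set.add vis v
    let ord' := ord ++ [v]
    let clist := (em.getD v PySem.Set.empty).filter (fun c => !(PySem.Set.contains vis' c))
    pvLoopA em f (clist.reverse ++ st) vis' ord' (ch.insert v clist)

-- 'for node in reversed(ordering): subtree_costs[node] = costs[node] + sum(...)'
def pvSubCosts (cd : PySem.Dict Int Int) (ch : PySem.Dict Int (List Int)) (ord : List Int) :
    PySem.Dict Int Int :=
  ord.reverse.foldl
    (fun sub v =>
      sub.insert v (cd.getD v 0 + (ch.getD v []).foldl (fun a c => a + sub.getD c 0) 0))
    PySem.Dict.empty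

def tree_cut (n : Int) (costs : List (Int × Int)) (edges : List (Int × Int)) : Int :=
  let em := pvEdgeMap edges
  let cd := PySem.Dict.mk costs
  let res := pvLoopA em ((2 * edges.length + 3) * (2 * edges.length + 3)) [1]
      PySem.Set.empty [] PySem.Dict.empty
  let ordering := res.2.1
  let children := res.2.2
  let sub := pvSubCosts cd children ordering
  let total := cd.values.foldl (fun a b => a + b) 0
  match PySem.List.min? (sub.values.map (fun s => |total - 2 * s|)) (fun x => x) with
  | some m => m
  | none => 0

-- ===== PORT B =====
-- 'if best is None or cut < best: best = cut'
def pvBestUpd (best : Option Int) (cut : Int) : Option Int :=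
  match best with
  | none => some cut
  | some b => if cut < b then some cut else some b

-- the while-loop of Source B; the frame stack is stored TOP-FIRST (Python pops/pushes at the
-- right end), and a frame's not-yet-scanned neighbour list rem — which Source B keeps reversed
-- and pops at its right end — is kept here in adjacency order and consumed at the head:
-- the same elements in the same order.  Fuel (provably) exceeds the number of iterations.
def pvLoopB (em : PySem.Dict Int (PySem.Set Int)) (cd : PySem.Dict Int Int) (total : Int) :
    Nat → List (Int × List Int × Int) → PySem.Set Int → Option Int → Option Int
  | 0, _, _, best => best
  | _ + 1, [], _, best => best
  | f + 1, (node, c :: rem', s) :: rest, vis, best =>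
    if PySem.Set.contains vis c then pvLoopB em cd total f ((node, rem', s) :: rest) vis best
    else
      pvLoopB em cd total f
        ((c, (em.getD c PySem.Set.empty : List Int), cd.getD c 0) :: (node, rem', s) :: rest)
        (PySem.Set.add vis c) best
  | f + 1, (_, [], s) :: (pn, prem, ps) :: rest', vis, best =>
    pvLoopB em cd total f ((pn, prem, ps + s) :: rest') vis (pvBestUpd best |total - 2 * s|)
  | f + 1, [(_, [], s)], vis, best =>
    pvLoopB em cd total f [] vis (pvBestUpd best |total - 2 * s|)

def tree_cut_alt (n : Int) (costs : List (Int × Int)) (edges : List (Int × Int)) : Int :=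
  let em := pvEdgeMap edges
  let cd := PySem.Dict.mk costs
  let total := cd.values.foldl (fun a b => a + b) 0
  let best := pvLoopB em cd total ((2 * edges.length + 3) * (2 * edges.length + 3))
      [(1, (em.getD 1 PySem.Set.empty : List Int), cd.getD 1 0)]
      (PySem.Set.add PySem.Set.empty 1) none
  match best with
  | some b => b
  | none => 0

-- ===== PRECONDITION & SPEC =====
-- neighbour list of a node (the edge_map both Pythons build)
def pvAdjL (edges : List (Int × Int)) (v : Int) : PySem.Set Int :=
  (pvEdgeMap edges).getD v PySem.Set.empty

-- breadth layers around node 1, the reachable set, and BFS distance from node 1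
def pvLayer (edges : List (Int × Int)) : Nat → PySem.Set Int
  | 0 => PySem.Set.add PySem.Set.empty 1
  | k + 1 =>
    (pvLayer edges k).foldl (fun acc v => PySem.Set.update acc (pvAdjL edges v))
      (pvLayer edges k)

def pvReach (edges : List (Int × Int)) : PySem.Set Int := pvLayer edges (2 * edges.length + 2)

def pvFirstMem (edges : List (Int × Int)) (v : Int) : Nat → Nat → Nat
  | 0, k => k
  | f + 1, k => if v ∈ pvLayer edges k then k else pvFirstMem edges v f (k + 1)

def pvDist (edges : List (Int × Int)) (v : Int) : Nat :=
  pvFirstMem edges v (2 * edges.length + 3) 0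

-- Pre_ excludes inputs on which A raises a KeyError (a node reachable from 1 missing from
-- costs) and inputs whose component of node 1 is not a tree (a cycle reachable from 1):
-- on the latter A still returns, but a value that double-counts subtrees and depends on
-- Python's set iteration order, a defensible-corner artefact no one would specify.
-- the component of node 1 is a tree: closed under adjacency, every edge joins
-- consecutive BFS levels, and every non-root has exactly one neighbour one level up
def pvTreePre (edges : List (Int × Int)) : Prop :=
  (∀ v ∈ pvReach edges, ∀ u ∈ pvAdjL edges v, u ∈ pvReach edges) ∧
  (∀ v ∈ pvReach edges, ∀ u ∈ pvAdjL edges v,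
      u = v ∨ pvDist edges u = pvDist edges v + 1 ∨ pvDist edges v = pvDist edges u + 1) ∧
  (∀ v ∈ pvReach edges, v ≠ 1 →
      ((pvAdjL edges v).filter (fun u => pvDist edges u + 1 == pvDist edges v)).length = 1)

def Pre_tree_cut (n : Int) (costs : List (Int × Int)) (edges : List (Int × Int)) : Prop :=
  (∀ v ∈ pvReach edges, ((PySem.Dict.mk costs).get? v).isSome = true) ∧ pvTreePre edges

instance (n : Int) (costs : List (Int × Int)) (edges : List (Int × Int)) :
    Decidable (Pre_tree_cut n costs edges) := by unfold Pre_tree_cut pvTreePre; infer_instance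

def pvWitness_tree_cut : Int × (List (Int × Int)) × (List (Int × Int)) :=
  (3, [(1, 5), (2, 7), (3, -2)], [(1, 2), (2, 3)])

def Spec_tree_cut (n : Int) (costs : List (Int × Int)) (edges : List (Int × Int)) (out : Int) : Prop :=
  out = tree_cut_alt n costs edges
instance (n : Int) (costs : List (Int × Int)) (edges : List (Int × Int)) (out : Int) :
    Decidable (Spec_tree_cut n costs edges out) := by unfold Spec_tree_cut; infer_instance

-- ===== CLAIM (what is proved, stated in full; the proofs are below) =====
def Claim_equal_tree_cut : Prop := ∀ (n : Int) (costs : List (Int × Int)) (edges : List (Int × Int)), Dom_tree_cut n costs edges → Pre_tree_cut n costs edges → Spec_tree_cut n costs edges (tree_cut n costs edges)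

-- ===== LEMMAS AND PROOFS =====

-- rose tree of the component of node 1 (explicit mutual pair: no nested inductive)
mutual
inductive pvTS : Type where
  | node : Int → pvTSL → pvTS
inductive pvTSL : Type where
  | nil : pvTSL
  | cons : pvTS → pvTSL → pvTSL
end

def rootT : pvTS → Int
  | .node v _ => v

mutual
def nodesT : pvTS → List Int
  | .node v ch => v :: nodesL ch
def nodesL : pvTSL → List Int
  | .nil => []
  | .cons t ts => nodesT t ++ nodesL ts
end

def rootsL : pvTSL → List Int
  | .nil => []
  | .cons t ts => rootT t :: rootsL ts

mutual
def heightT : pvTS → Nat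
  | .node _ ch => heightL ch + 1
def heightL : pvTSL → Nat
  | .nil => 0
  | .cons t ts => max (heightT t) (heightL ts)
end

mutual
def sumT (cd : PySem.Dict Int Int) : pvTS → Int
  | .node v ch => cd.getD v 0 + sumL cd ch
def sumL (cd : PySem.Dict Int Int) : pvTSL → Int
  | .nil => 0
  | .cons t ts => sumT cd t + sumL cd ts
end

-- A's pop order (children pushed left-to-right, popped right-to-left)
mutual
def ordAT : pvTS → List Int
  | .node v ch => v :: ordAL ch
def ordAL : pvTSL → List Int
  | .nil => []
  | .cons t ts => ordAL ts ++ ordAT t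
end

-- the (node, children-list) pairs A's loop stores, in pop order
mutual
def chPairsT : pvTS → List (Int × List Int)
  | .node v ch => (v, rootsL ch) :: chPairsL ch
def chPairsL : pvTSL → List (Int × List Int)
  | .nil => []
  | .cons t ts => chPairsL ts ++ chPairsT t
end

-- the (node, subtree-sum) pairs A's third pass inserts, in reversed pop order
mutual
def pairsPostT (cd : PySem.Dict Int Int) : pvTS → List (Int × Int)
  | .node v ch => pairsPostL cd ch ++ [(v, sumT cd (.node v ch))]
def pairsPostL (cd : PySem.Dict Int Int) : pvTSL → List (Int × Int)
  | .nil => []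
  | .cons t ts => pairsPostT cd t ++ pairsPostL cd ts
end

-- B's visit order (children left-to-right)
mutual
def ordBT : pvTS → List Int
  | .node v ch => v :: ordBL ch
def ordBL : pvTSL → List Int
  | .nil => []
  | .cons t ts => ordBT t ++ ordBL ts
end

-- the tree correctly describes the graph hanging below a node with parent po
mutual
def RepT (edges : List (Int × Int)) (po : Option Int) : pvTS → Prop
  | .node v ch =>
    ((pvAdjL edges v).filter (fun u => !(u == v || po == some u)) = rootsL ch) ∧
    RepL edges v ch
def RepL (edges : List (Int × Int)) (v : Int) : pvTSL → Prop
  | .nil => True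
  | .cons t ts => RepT edges (some v) t ∧ RepL edges v ts
end

-- build the component tree from BFS distances
mutual
def buildT (edges : List (Int × Int)) : Nat → Int → pvTS
  | 0, v => .node v .nil
  | f + 1, v =>
    .node v (buildL edges f
      ((pvAdjL edges v).filter (fun u => pvDist edges u == pvDist edges v + 1)))
termination_by f v => (f, 0)
def buildL (edges : List (Int × Int)) : Nat → List Int → pvTSL
  | _, [] => .nil
  | f, c :: cs => .cons (buildT edges f c) (buildL edges f cs)
termination_by f l => (f, l.length + 1)
end

def pvParentF (edges : List (Int × Int)) (v : Int) : Int :=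
  (((pvAdjL edges v).filter (fun u => pvDist edges u + 1 == pvDist edges v)).headD 0)

def pvUp (edges : List (Int × Int)) : Nat → Int → Int
  | 0, u => u
  | j + 1, u => pvUp edges j (pvParentF edges u)


-- ---------- generic set-fold lemmas ----------
theorem pv_mem_foldl_update (g : Int → List Int) :
    ∀ (l : List Int) (s : PySem.Set Int) (y : Int),
      (y ∈ l.foldl (fun acc v => PySem.Set.update acc (g v)) s) ↔ y ∈ s ∨ ∃ v ∈ l, y ∈ g v := by
  intro l
  induction l with
  | nil => simp
  | cons x l ih =>
    intro s y
    simp only [List.foldl_cons, ih, PySem.Set.mem_update, List.mem_cons]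
    constructor
    · rintro ((h | h) | ⟨v, hv, hy⟩)
      · exact Or.inl h
      · exact Or.inr ⟨x, Or.inl rfl, h⟩
      · exact Or.inr ⟨v, Or.inr hv, hy⟩
    · rintro (h | ⟨v, (rfl | hv), hy⟩)
      · exact Or.inl (Or.inl h)
      · exact Or.inl (Or.inr hy)
      · exact Or.inr ⟨v, hv, hy⟩

theorem pv_nodup_foldl_update (g : Int → List Int) :
    ∀ (l : List Int) (s : PySem.Set Int), s.Nodup →
      (l.foldl (fun acc v => PySem.Set.update acc (g v)) s).Nodup := by
  intro l
  induction l with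
  | nil => intro s hs; simpa using hs
  | cons x l ih => intro s hs; exact ih _ (PySem.Set.nodup_update _ _ hs)

theorem pv_mem_foldl_add :
    ∀ (l : List Int) (s : PySem.Set Int) (y : Int),
      (y ∈ l.foldl PySem.Set.add s) ↔ y ∈ s ∨ y ∈ l := by
  intro l
  induction l with
  | nil => simp
  | cons x l ih =>
    intro s y
    simp only [List.foldl_cons, ih, PySem.Set.mem_add, List.mem_cons]
    tauto

-- ---------- adjacency lemmas ----------
theorem pv_mem_edgeMap_foldl :
    ∀ (l : List (Int × Int)) (em : PySem.Dict Int (PySem.Set Int)) (v u : Int),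
      (u ∈ (l.foldl
        (fun em p =>
          let em1 := em.modify p.1 PySem.Set.empty (fun s => PySem.Set.add s p.2)
          em1.modify p.2 PySem.Set.empty (fun s => PySem.Set.add s p.1)) em).getD v PySem.Set.empty)
      ↔ u ∈ em.getD v PySem.Set.empty ∨ (v, u) ∈ l ∨ (u, v) ∈ l := by
  intro l
  induction l with
  | nil => simp
  | cons p l ih =>
    intro em v u
    simp only [List.foldl_cons, ih]
    have hstep : (u ∈ ((em.modify p.1 PySem.Set.empty (fun s => PySem.Set.add s p.2)).modify p.2
          PySem.Set.empty (fun s => PySem.Set.add s p.1)).getD v PySem.Set.empty)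
        ↔ u ∈ em.getD v PySem.Set.empty ∨ (v = p.1 ∧ u = p.2) ∨ (v = p.2 ∧ u = p.1) := by
      rw [PySem.Dict.getD_modify, PySem.Dict.getD_modify]
      by_cases h2 : v = p.2 <;> by_cases h1 : v = p.1 <;> by_cases h12 : p.1 = p.2 <;>
        simp_all [PySem.Set.mem_add, PySem.Dict.getD_modify] <;> tauto
    rw [hstep]
    simp only [List.mem_cons, Prod.ext_iff]
    constructor
    · rintro ((h | h | h) | h | h) <;> tauto
    · rintro (h | (h | h) | (h | h)) <;> tauto

theorem pv_mem_adjL (edges : List (Int × Int)) (v u : Int) :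
    u ∈ pvAdjL edges v ↔ (v, u) ∈ edges ∨ (u, v) ∈ edges := by
  have := pv_mem_edgeMap_foldl edges PySem.Dict.empty v u
  simpa [pvAdjL, pvEdgeMap] using this

theorem pv_adjL_symm (edges : List (Int × Int)) (v u : Int) :
    u ∈ pvAdjL edges v ↔ v ∈ pvAdjL edges u := by
  rw [pv_mem_adjL, pv_mem_adjL]; tauto

theorem pv_nodup_edgeMap_foldl :
    ∀ (l : List (Int × Int)) (em : PySem.Dict Int (PySem.Set Int)),
      (∀ w, ((em.getD w PySem.Set.empty : PySem.Set Int)).Nodup) →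
      ∀ v, ((l.foldl
        (fun em p =>
          let em1 := em.modify p.1 PySem.Set.empty (fun s => PySem.Set.add s p.2)
          em1.modify p.2 PySem.Set.empty (fun s => PySem.Set.add s p.1)) em).getD v PySem.Set.empty
        : PySem.Set Int).Nodup := by
  intro l
  induction l with
  | nil => intro em h v; exact h v
  | cons p l ih =>
    intro em h v
    refine ih _ ?_ v
    intro w
    rw [PySem.Dict.getD_modify, PySem.Dict.getD_modify]
    by_cases h2 : w = p.2 <;> by_cases h1 : w = p.1 <;> by_cases h12 : p.1 = p.2 <;>
      simp_all [PySem.Dict.getD_modify] <;>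
      first
      | exact PySem.Set.nodup_add _ _ (h _)
      | exact PySem.Set.nodup_add _ _ (PySem.Set.nodup_add _ _ (h _))
      | exact h _

theorem pv_adjL_nodup (edges : List (Int × Int)) (v : Int) :
    (pvAdjL edges v : PySem.Set Int).Nodup := by
  have := pv_nodup_edgeMap_foldl edges PySem.Dict.empty (by intro w; simp) v
  simpa [pvAdjL, pvEdgeMap] using this

-- ---------- layer lemmas ----------
theorem pv_mem_layer_succ (edges : List (Int × Int)) (k : Nat) (u : Int) :
    u ∈ pvLayer edges (k + 1) ↔
      u ∈ pvLayer edges k ∨ ∃ w ∈ pvLayer edges k, u ∈ pvAdjL edges w := by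
  simp [pvLayer, pv_mem_foldl_update]

theorem pv_layer_subset_succ (edges : List (Int × Int)) (k : Nat) :
    ∀ u, u ∈ pvLayer edges k → u ∈ pvLayer edges (k + 1) := by
  intro u hu; rw [pv_mem_layer_succ]; exact Or.inl hu

theorem pv_layer_nodup (edges : List (Int × Int)) : ∀ k, (pvLayer edges k : PySem.Set Int).Nodup
  | 0 => by simp [pvLayer, PySem.Set.add, PySem.Set.empty]
  | k + 1 => pv_nodup_foldl_update _ _ _ (pv_layer_nodup edges k)

theorem pv_one_mem_layer (edges : List (Int × Int)) (k : Nat) : (1 : Int) ∈ pvLayer edges k := by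
  induction k with
  | zero => simp [pvLayer, PySem.Set.add, PySem.Set.empty]
  | succ k ih => exact pv_layer_subset_succ _ _ _ ih

theorem pv_firstMem_spec (edges : List (Int × Int)) (v : Int) :
    ∀ (fuel k j : Nat), j < fuel → v ∈ pvLayer edges (k + j) →
      v ∈ pvLayer edges (pvFirstMem edges v fuel k) ∧
      pvFirstMem edges v fuel k ≤ k + j ∧
      (∀ i, k ≤ i → i < pvFirstMem edges v fuel k → v ∉ pvLayer edges i) := by
  intro fuel
  induction fuel with
  | zero => intro k j hj; omega
  | succ fuel ih =>
    intro k j hj hv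
    by_cases hk : v ∈ pvLayer edges k
    · have hfm : pvFirstMem edges v (fuel + 1) k = k := by simp [pvFirstMem, hk]
      rw [hfm]
      exact ⟨hk, by omega, by intro i h1 h2; omega⟩
    · have hfm : pvFirstMem edges v (fuel + 1) k = pvFirstMem edges v fuel (k + 1) := by
        simp [pvFirstMem, hk]
      have hj0 : j ≠ 0 := by rintro rfl; exact hk hv
      obtain ⟨j', rfl⟩ : ∃ j', j = j' + 1 := ⟨j - 1, by omega⟩
      have hv' : v ∈ pvLayer edges (k + 1 + j') := by
        have : k + 1 + j' = k + (j' + 1) := by omega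
        rw [this]; exact hv
      obtain ⟨h1, h2, h3⟩ := ih (k + 1) j' (by omega) hv'
      rw [hfm]
      refine ⟨h1, by omega, ?_⟩
      intro i hi1 hi2
      rcases Nat.eq_or_lt_of_le hi1 with rfl | hlt
      · exact hk
      · exact h3 i (by omega) hi2


-- ---------- dist corollaries ----------
theorem pv_dist_le (edges : List (Int × Int)) {v : Int} {m : Nat}
    (hm : m ≤ 2 * edges.length + 2) (hv : v ∈ pvLayer edges m) : pvDist edges v ≤ m := by
  have := (pv_firstMem_spec edges v (2 * edges.length + 3) 0 m (by omega) (by simpa using hv)).2.1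
  simpa [pvDist] using this

theorem pv_dist_le_K (edges : List (Int × Int)) {v : Int} (hv : v ∈ pvReach edges) :
    pvDist edges v ≤ 2 * edges.length + 2 :=
  pv_dist_le edges le_rfl (by simpa [pvReach] using hv)

theorem pv_mem_layer_zero (edges : List (Int × Int)) {v : Int} :
    v ∈ pvLayer edges 0 ↔ v = 1 := by
  simp [pvLayer, PySem.Set.add, PySem.Set.empty, PySem.Set.contains]

theorem pv_dist_one (edges : List (Int × Int)) : pvDist edges 1 = 0 := by
  have h1 : (1 : Int) ∈ pvLayer edges 0 := (pv_mem_layer_zero edges).2 rfl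
  have := pv_dist_le edges (by omega) h1
  omega

theorem pv_one_mem_reach (edges : List (Int × Int)) : (1 : Int) ∈ pvReach edges :=
  pv_one_mem_layer edges _

theorem pv_parent_unique (edges : List (Int × Int)) (hpre : pvTreePre edges)
    {v w w' : Int} (hv : v ∈ pvReach edges) (hv1 : v ≠ 1)
    (hw : w ∈ pvAdjL edges v) (hdw : pvDist edges w + 1 = pvDist edges v)
    (hw' : w' ∈ pvAdjL edges v) (hdw' : pvDist edges w' + 1 = pvDist edges v) : w = w' := by
  have hlen := hpre.2.2 v hv hv1
  obtain ⟨a, ha⟩ := List.length_eq_one_iff.1 hlen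
  have h1 : w ∈ (pvAdjL edges v).filter (fun u => pvDist edges u + 1 == pvDist edges v) := by
    rw [List.mem_filter]; exact ⟨hw, by simpa using hdw⟩
  have h2 : w' ∈ (pvAdjL edges v).filter (fun u => pvDist edges u + 1 == pvDist edges v) := by
    rw [List.mem_filter]; exact ⟨hw', by simpa using hdw'⟩
  rw [ha] at h1 h2
  simp at h1 h2
  rw [h1, h2]

theorem pv_parentF_eq (edges : List (Int × Int)) (hpre : pvTreePre edges)
    {v w : Int} (hv : v ∈ pvReach edges) (hv1 : v ≠ 1)
    (hw : w ∈ pvAdjL edges v) (hdw : pvDist edges w + 1 = pvDist edges v) :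
    pvParentF edges v = w := by
  have hlen := hpre.2.2 v hv hv1
  obtain ⟨a, ha⟩ := List.length_eq_one_iff.1 hlen
  have h1 : w ∈ (pvAdjL edges v).filter (fun u => pvDist edges u + 1 == pvDist edges v) := by
    rw [List.mem_filter]; exact ⟨hw, by simpa using hdw⟩
  rw [ha] at h1
  simp at h1
  rw [pvParentF, ha, h1]
  rfl

theorem pv_parentF_child (edges : List (Int × Int)) (hpre : pvTreePre edges)
    {v c : Int} (hv : v ∈ pvReach edges) (hc : c ∈ pvAdjL edges v)
    (hd : pvDist edges c = pvDist edges v + 1) :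
    pvParentF edges c = v ∧ c ∈ pvReach edges ∧ c ≠ 1 := by
  have hcr : c ∈ pvReach edges := hpre.1 v hv c hc
  have hc1 : c ≠ 1 := by
    rintro rfl
    rw [pv_dist_one] at hd; omega
  exact ⟨pv_parentF_eq edges hpre hcr hc1 ((pv_adjL_symm edges v c).1 hc) (by omega), hcr, hc1⟩

theorem pvUp_add (edges : List (Int × Int)) :
    ∀ (a b : Nat) (u : Int), pvUp edges (a + b) u = pvUp edges b (pvUp edges a u) := by
  intro a
  induction a with
  | zero => intro b u; simp [pvUp]
  | succ a ih =>
    intro b u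
    have : a + 1 + b = (a + b) + 1 := by omega
    rw [this]
    show pvUp edges (a + b) (pvParentF edges u) = _
    rw [ih]
    rfl


-- ---------- buildT lemmas ----------
theorem pv_rootT_buildT (edges : List (Int × Int)) (f : Nat) (v : Int) :
    rootT (buildT edges f v) = v := by
  cases f <;> simp [buildT, rootT]

theorem pv_rootsL_buildL (edges : List (Int × Int)) (f : Nat) :
    ∀ cs : List Int, rootsL (buildL edges f cs) = cs := by
  intro cs
  induction cs with
  | nil => simp [buildL, rootsL]
  | cons c cs ih => simp [buildL, rootsL, pv_rootT_buildT, ih]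

mutual
theorem pv_build_good (edges : List (Int × Int)) (hpre : pvTreePre edges)
    (f : Nat) (v : Int) (po : Option Int) (hv : v ∈ pvReach edges)
    (hf : 2 * edges.length + 2 ≤ f + pvDist edges v)
    (hpo : ∀ u ∈ pvAdjL edges v, (po = some u ↔ pvDist edges u + 1 = pvDist edges v)) :
    RepT edges po (buildT edges f v) ∧ (nodesT (buildT edges f v)).Nodup ∧
    (∀ u ∈ nodesT (buildT edges f v), u ∈ pvReach edges ∧
        pvDist edges v ≤ pvDist edges u ∧
        pvUp edges (pvDist edges u - pvDist edges v) u = v) := by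
  cases f with
  | zero =>
    have hfilt : (pvAdjL edges v).filter
        (fun u => !(u == v || po == some u)) = [] := by
      rw [List.filter_eq_nil_iff]
      intro u hu
      rcases hpre.2.1 v hv u hu with rfl | h | h
      · simp
      · have hur : u ∈ pvReach edges := hpre.1 v hv u hu
        have := pv_dist_le_K edges hur
        omega
      · have : po = some u := (hpo u hu).2 (by omega)
        simp [this]
    rw [buildT, RepT, nodesT]
    refine ⟨⟨by simpa [rootsL] using hfilt, trivial⟩, by simp [nodesL], ?_⟩
    intro u hu
    simp [nodesL] at hu
    subst hu
    exact ⟨hv, le_rfl, by simp [pvUp]⟩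
  | succ f =>
    set cs := (pvAdjL edges v).filter (fun u => pvDist edges u == pvDist edges v + 1) with hcs_def
    have hcs : ∀ c ∈ cs, c ∈ pvAdjL edges v ∧ pvDist edges c = pvDist edges v + 1 := by
      intro c hc
      rw [hcs_def, List.mem_filter] at hc
      exact ⟨hc.1, by simpa using hc.2⟩
    have hnd : cs.Nodup := List.Nodup.filter _ (pv_adjL_nodup edges v)
    obtain ⟨hrepL, hndL, hchainL⟩ :=
      pv_buildL_good edges hpre f v cs hcs hnd hv (by omega)
    have hfilt : (pvAdjL edges v).filter (fun u => !(u == v || po == some u)) = cs := by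
      rw [hcs_def]
      apply List.filter_congr
      intro u hu
      rcases hpre.2.1 v hv u hu with rfl | h | h
      · simp
      · have h1 : u ≠ v := by intro h'; rw [h'] at h; omega
        have h2 : po ≠ some u := by
          intro h'
          have := (hpo u hu).1 h'
          omega
        simp [h1, h2, h]
      · have h1 : po = some u := (hpo u hu).2 (by omega)
        have h2 : ¬ (pvDist edges u = pvDist edges v + 1) := by omega
        simp [h1, h2]
    rw [buildT, RepT, nodesT]
    constructor
    · exact ⟨by simpa [pv_rootsL_buildL] using hfilt, hrepL⟩
    constructor
    · rw [List.nodup_cons]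
      refine ⟨?_, hndL⟩
      intro hmem
      have := (hchainL v hmem).2.1
      omega
    · intro u hu
      rw [List.mem_cons] at hu
      rcases hu with rfl | hu
      · exact ⟨hv, le_rfl, by simp [pvUp]⟩
      · obtain ⟨hur, hud, c, hcmem, hchain⟩ := hchainL u hu
        obtain ⟨hcadj, hcd⟩ := hcs c hcmem
        obtain ⟨hpf, hcr, hc1⟩ := pv_parentF_child edges hpre hv hcadj hcd
        refine ⟨hur, by omega, ?_⟩
        have harith : pvDist edges u - pvDist edges v =
            (pvDist edges u - (pvDist edges v + 1)) + 1 := by omega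
        rw [harith, pvUp_add]
        rw [hchain]
        show pvUp edges 0 (pvParentF edges c) = v
        rw [pvUp, hpf]
termination_by (f, 0)

theorem pv_buildL_good (edges : List (Int × Int)) (hpre : pvTreePre edges)
    (f : Nat) (v : Int) (cs : List Int)
    (hcs : ∀ c ∈ cs, c ∈ pvAdjL edges v ∧ pvDist edges c = pvDist edges v + 1)
    (hnd : cs.Nodup) (hv : v ∈ pvReach edges)
    (hf : 2 * edges.length + 2 ≤ f + pvDist edges v + 1) :
    RepL edges v (buildL edges f cs) ∧ (nodesL (buildL edges f cs)).Nodup ∧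
    (∀ u ∈ nodesL (buildL edges f cs), u ∈ pvReach edges ∧
        pvDist edges v + 1 ≤ pvDist edges u ∧
        ∃ c ∈ cs, pvUp edges (pvDist edges u - (pvDist edges v + 1)) u = c) := by
  match cs, hnd with
  | [], _ => rw [buildL, RepL, nodesL]; exact ⟨trivial, by simp, by simp⟩
  | c :: cs', hnd =>
    obtain ⟨hcadj, hcd⟩ := hcs c (List.mem_cons_self ..)
    obtain ⟨hpf, hcr, hc1⟩ := pv_parentF_child edges hpre hv hcadj hcd
    have hpoc : ∀ u ∈ pvAdjL edges c, (some v = some u ↔ pvDist edges u + 1 = pvDist edges c) := by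
      intro u hu
      constructor
      · intro h
        obtain rfl := Option.some.inj h
        omega
      · intro h
        have hvc : v ∈ pvAdjL edges c := (pv_adjL_symm edges v c).1 hcadj
        have := pv_parent_unique edges hpre hcr hc1 hu (by omega) hvc (by omega)
        rw [this]
    obtain ⟨hrepT, hndT, hchainT⟩ :=
      pv_build_good edges hpre f c (some v) hcr (by omega) hpoc
    obtain ⟨hrepL, hndL, hchainL⟩ :=
      pv_buildL_good edges hpre f v cs' (fun x hx => hcs x (List.mem_cons_of_mem _ hx))
        (List.Nodup.of_cons hnd) hv hf
    rw [buildL, RepL, nodesL]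
    refine ⟨⟨hrepT, hrepL⟩, ?_, ?_⟩
    · rw [List.nodup_append]
      refine ⟨hndT, hndL, ?_⟩
      intro u huT b hbL
      rintro rfl
      obtain ⟨_, hud, hchain⟩ := hchainT u huT
      obtain ⟨_, _, c', hc'mem, hchain'⟩ := hchainL u hbL
      have : c = c' := by
        rw [← hchain', ← hchain]
        congr 1
        omega
      subst this
      exact (List.nodup_cons.1 hnd).1 hc'mem
    · intro u hu
      rw [List.mem_append] at hu
      rcases hu with hu | hu
      · obtain ⟨hur, hud, hchain⟩ := hchainT u hu
        exact ⟨hur, by omega, c, List.mem_cons_self .., by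
          have : pvDist edges u - (pvDist edges v + 1) = pvDist edges u - pvDist edges c := by omega
          rw [this, hchain]⟩
      · obtain ⟨hur, hud, c', hc', hchain⟩ := hchainL u hu
        exact ⟨hur, hud, c', List.mem_cons_of_mem _ hc', hchain⟩
termination_by (f, cs.length + 1)
end


-- ---------- tree structure helper lemmas ----------
theorem pv_rootT_mem : ∀ (t : pvTS), rootT t ∈ nodesT t
  | .node v ch => by rw [rootT, nodesT]; exact List.mem_cons_self ..

theorem pv_rootsL_subset : ∀ (ts : pvTSL), ∀ u ∈ rootsL ts, u ∈ nodesL ts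
  | .nil => by simp [rootsL]
  | .cons t ts => by
    intro u hu
    rw [rootsL, List.mem_cons] at hu
    rw [nodesL, List.mem_append]
    rcases hu with rfl | hu
    · exact Or.inl (pv_rootT_mem t)
    · exact Or.inr (pv_rootsL_subset ts u hu)

mutual
theorem pv_mem_ordAT : ∀ (t : pvTS) (u : Int), u ∈ ordAT t ↔ u ∈ nodesT t
  | .node v ch => by
    intro u
    rw [ordAT, nodesT, List.mem_cons, List.mem_cons, pv_mem_ordAL ch u]
theorem pv_mem_ordAL : ∀ (ts : pvTSL) (u : Int), u ∈ ordAL ts ↔ u ∈ nodesL ts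
  | .nil => by simp [ordAL, nodesL]
  | .cons t ts => by
    intro u
    rw [ordAL, nodesL, List.mem_append, List.mem_append,
      pv_mem_ordAT t u, pv_mem_ordAL ts u]
    tauto
end

mutual
theorem pv_mem_ordBT : ∀ (t : pvTS) (u : Int), u ∈ ordBT t ↔ u ∈ nodesT t
  | .node v ch => by
    intro u
    rw [ordBT, nodesT, List.mem_cons, List.mem_cons, pv_mem_ordBL ch u]
theorem pv_mem_ordBL : ∀ (ts : pvTSL) (u : Int), u ∈ ordBL ts ↔ u ∈ nodesL ts
  | .nil => by simp [ordBL, nodesL]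
  | .cons t ts => by
    intro u
    rw [ordBL, nodesL, List.mem_append, List.mem_append,
      pv_mem_ordBT t u, pv_mem_ordBL ts u]
end

theorem pv_adj_cases (edges : List (Int × Int)) (po : Option Int) (c : Int) (ch1 : pvTSL)
    (hrep : RepT edges po (.node c ch1)) :
    ∀ u ∈ pvAdjL edges c, u = c ∨ po = some u ∨ u ∈ rootsL ch1 := by
  intro u hu
  by_cases h1 : u = c
  · exact Or.inl h1
  by_cases h2 : po = some u
  · exact Or.inr (Or.inl h2)
  refine Or.inr (Or.inr ?_)
  rw [← (show ((pvAdjL edges c).filter (fun u => !(u == c || po == some u)) = rootsL ch1)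
      from hrep.1)]
  rw [List.mem_filter]
  exact ⟨hu, by simp [h1, h2]⟩

-- ---------- the A loop processes exactly the component tree ----------
mutual
theorem pv_lemA (edges : List (Int × Int)) :
    ∀ (t : pvTS) (po : Option Int) (f : Nat) (st : List Int) (vis : PySem.Set Int)
      (ord : List Int) (ch : PySem.Dict Int (List Int)),
    RepT edges po t → (nodesT t).Nodup →
    (∀ u ∈ nodesT t, u ∉ vis) →
    (∀ u ∈ pvAdjL edges (rootT t), (u ∈ vis ↔ po = some u)) →
    pvLoopA (pvEdgeMap edges) (f + (nodesT t).length) (rootT t :: st) vis ord ch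
      = pvLoopA (pvEdgeMap edges) f st ((ordAT t).foldl PySem.Set.add vis) (ord ++ ordAT t)
          ((chPairsT t).foldl (fun d p => d.insert p.1 p.2) ch)
  | .node v ch1 => by
    intro po f st vis ord ch hrep hnd hvis hpo
    simp only [rootT] at hpo ⊢
    have hfuel : f + (nodesT (pvTS.node v ch1)).length = (f + (nodesL ch1).length) + 1 := by
      rw [nodesT]; simp; omega
    rw [hfuel, pvLoopA]
    have hclist : ((pvEdgeMap edges).getD v PySem.Set.empty).filter
        (fun c => !(PySem.Set.contains (PySem.Set.add vis v) c)) = rootsL ch1 := by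
      rw [← (show ((pvAdjL edges v).filter (fun u => !(u == v || po == some u)) = rootsL ch1)
          from hrep.1)]
      show (pvAdjL edges v).filter _ = (pvAdjL edges v).filter _
      apply List.filter_congr
      intro u hu
      have h2 := hpo u hu
      have hcont : PySem.Set.contains (PySem.Set.add vis v) u = true ↔ (u ∈ vis ∨ u = v) := by
        rw [PySem.Set.contains_iff, PySem.Set.mem_add]
      by_cases hv1 : u = v <;> by_cases hv2 : po = some u
      · simp_all
      · simp_all
      · have : u ∈ vis := h2.2 hv2
        simp_all
      · have : u ∉ vis := fun h => hv2 (h2.1 h)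
        simp_all
    rw [hclist]
    have := pv_lemAL edges ch1 v f st (PySem.Set.add vis v) (ord ++ [v])
      (ch.insert v (rootsL ch1)) hrep.2 (by rw [nodesT] at hnd; exact (List.nodup_cons.1 hnd).2)
      (by
        intro u hu
        rw [PySem.Set.mem_add]
        rintro (h | rfl)
        · exact hvis u (by rw [nodesT]; exact List.mem_cons_of_mem _ hu) h
        · rw [nodesT] at hnd; exact (List.nodup_cons.1 hnd).1 hu)
      (by rw [PySem.Set.mem_add]; exact Or.inr rfl)
    rw [this]
    rw [ordAT, chPairsT]
    simp only [List.foldl_cons, List.append_assoc, List.singleton_append]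
theorem pv_lemAL (edges : List (Int × Int)) :
    ∀ (ts : pvTSL) (v : Int) (f : Nat) (st : List Int) (vis : PySem.Set Int)
      (ord : List Int) (ch : PySem.Dict Int (List Int)),
    RepL edges v ts → (nodesL ts).Nodup →
    (∀ u ∈ nodesL ts, u ∉ vis) → v ∈ vis →
    pvLoopA (pvEdgeMap edges) (f + (nodesL ts).length) ((rootsL ts).reverse ++ st) vis ord ch
      = pvLoopA (pvEdgeMap edges) f st ((ordAL ts).foldl PySem.Set.add vis) (ord ++ ordAL ts)
          ((chPairsL ts).foldl (fun d p => d.insert p.1 p.2) ch)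
  | .nil => by
    intro v f st vis ord ch _ _ _ _
    simp [rootsL, ordAL, chPairsL, nodesL]
  | .cons t1 ts' => by
    intro v f st vis ord ch hrep hnd hvis hv
    have hdisj : ∀ u ∈ nodesT t1, u ∉ nodesL ts' := by
      rw [nodesL] at hnd
      intro u hu1 hu2
      rcases List.nodup_append.1 hnd with ⟨_, _, hd⟩
      exact hd u hu1 u hu2 rfl
    have hstack : (rootsL (pvTSL.cons t1 ts')).reverse ++ st
        = (rootsL ts').reverse ++ (rootT t1 :: st) := by
      rw [rootsL, List.reverse_cons, List.append_assoc]; rfl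
    have hfuel : f + (nodesL (pvTSL.cons t1 ts')).length
        = (f + (nodesT t1).length) + (nodesL ts').length := by
      rw [nodesL, List.length_append]; omega
    rw [hstack, hfuel]
    rw [pv_lemAL edges ts' v (f + (nodesT t1).length) (rootT t1 :: st) vis ord ch
      hrep.2 (by rw [nodesL] at hnd; exact (List.nodup_append.1 hnd).2.1)
      (fun u hu => hvis u (by rw [nodesL]; exact List.mem_append_right _ hu)) hv]
    obtain ⟨c, ch1, rfl⟩ : ∃ c ch1, t1 = pvTS.node c ch1 := by
      cases t1 with | node c ch1 => exact ⟨c, ch1, rfl⟩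
    have hvis2 : ∀ u, u ∈ (ordAL ts').foldl PySem.Set.add vis ↔ u ∈ vis ∨ u ∈ ordAL ts' :=
      fun u => pv_mem_foldl_add (ordAL ts') vis u
    rw [pv_lemA edges (pvTS.node c ch1) (some v) f st ((ordAL ts').foldl PySem.Set.add vis)
      (ord ++ ordAL ts') ((chPairsL ts').foldl (fun d p => d.insert p.1 p.2) ch)
      hrep.1 (by rw [nodesL] at hnd; exact (List.nodup_append.1 hnd).1)
      (by
        intro u hu
        rw [hvis2]
        rintro (h | h)
        · exact hvis u (by rw [nodesL]; exact List.mem_append_left _ hu) h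
        · exact hdisj u hu ((pv_mem_ordAL ts' u).1 h))
      (by
        intro u hu
        rw [hvis2]
        constructor
        · have humem : u ∈ pvAdjL edges c := by simpa [rootT] using hu
          rintro (h | h)
          · rcases pv_adj_cases edges (some v) c ch1 hrep.1 u humem with hc | hpar | hroot
            · exact absurd h (hvis u (by
                rw [nodesL]
                refine List.mem_append_left _ ?_
                rw [hc, nodesT]
                exact List.mem_cons_self ..))
            · exact hpar
            · exact absurd h (hvis u (by
                rw [nodesL]
                refine List.mem_append_left _ ?_
                rw [nodesT]
                exact List.mem_cons_of_mem _ (pv_rootsL_subset ch1 u hroot)))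
          · rcases pv_adj_cases edges (some v) c ch1 hrep.1 u humem with hc | hpar | hroot
            · exact absurd ((pv_mem_ordAL ts' u).1 h)
                (hdisj u (by rw [hc, nodesT]; exact List.mem_cons_self ..))
            · exact hpar
            · exact absurd ((pv_mem_ordAL ts' u).1 h)
                (hdisj u (by
                  rw [nodesT]
                  exact List.mem_cons_of_mem _ (pv_rootsL_subset ch1 u hroot)))
        · intro h
          obtain rfl := Option.some.inj h
          exact Or.inl hv)]
    rw [ordAL, chPairsL]
    rw [List.foldl_append, List.foldl_append, List.append_assoc]
end


-- ---------- membership in a child list ----------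
def tslMem (t' : pvTS) : pvTSL → Prop
  | .nil => False
  | .cons t ts => t' = t ∨ tslMem t' ts

mutual
theorem pv_perm_ordAT : ∀ (t : pvTS), (ordAT t).Perm (nodesT t)
  | .node v ch => by
    rw [ordAT, nodesT]
    exact List.Perm.cons v (pv_perm_ordAL ch)
theorem pv_perm_ordAL : ∀ (ts : pvTSL), (ordAL ts).Perm (nodesL ts)
  | .nil => by rw [ordAL, nodesL]
  | .cons t ts => by
    rw [ordAL, nodesL]
    exact (List.perm_append_comm).trans
      (List.Perm.append (pv_perm_ordAT t) (pv_perm_ordAL ts))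
end

mutual
theorem pv_keys_pairsPostT (cd : PySem.Dict Int Int) :
    ∀ (t : pvTS), (pairsPostT cd t).map Prod.fst = (ordAT t).reverse
  | .node v ch => by
    rw [pairsPostT, ordAT, List.reverse_cons, List.map_append,
      pv_keys_pairsPostL cd ch]
    rfl
theorem pv_keys_pairsPostL (cd : PySem.Dict Int Int) :
    ∀ (ts : pvTSL), (pairsPostL cd ts).map Prod.fst = (ordAL ts).reverse
  | .nil => by rw [pairsPostL, ordAL]; rfl
  | .cons t ts => by
    rw [pairsPostL, ordAL, List.reverse_append, List.map_append,
      pv_keys_pairsPostT cd t, pv_keys_pairsPostL cd ts]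
end

theorem pv_root_pair_memT (cd : PySem.Dict Int Int) :
    ∀ (t : pvTS), (rootT t, sumT cd t) ∈ pairsPostT cd t
  | .node v ch => by
    rw [pairsPostT, rootT]
    exact List.mem_append_right _ (by simp)

theorem pv_root_pair_memL (cd : PySem.Dict Int Int) :
    ∀ (ts : pvTSL) (t' : pvTS), tslMem t' ts → (rootT t', sumT cd t') ∈ pairsPostL cd ts
  | .cons t ts, t', h => by
    rw [pairsPostL, List.mem_append]
    rcases h with rfl | h
    · exact Or.inl (pv_root_pair_memT cd t')
    · exact Or.inr (pv_root_pair_memL cd ts t' h)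

theorem pv_sum_children (cd : PySem.Dict Int Int) (d : PySem.Dict Int Int) :
    ∀ (ts : pvTSL) (a0 : Int),
      (∀ t', tslMem t' ts → d.getD (rootT t') 0 = sumT cd t') →
      (rootsL ts).foldl (fun a c => a + d.getD c 0) a0 = a0 + sumL cd ts
  | .nil, a0, _ => by rw [rootsL, sumL]; simp
  | .cons t ts, a0, h => by
    rw [rootsL, sumL, List.foldl_cons,
      pv_sum_children cd d ts _ (fun t' ht' => h t' (Or.inr ht')),
      h t (Or.inl rfl)]
    ring

-- ---------- the third pass computes the subtree sums ----------
mutual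
theorem pv_lemP (cd : PySem.Dict Int Int) (chF : PySem.Dict Int (List Int)) :
    ∀ (t : pvTS) (sub : PySem.Dict Int Int),
    (∀ p ∈ chPairsT t, chF.getD p.1 [] = p.2) →
    (nodesT t).Nodup →
    (∀ u ∈ nodesT t, u ∉ sub.keys) →
    sub.keys.Nodup →
    ((ordAT t).reverse.foldl
        (fun s v => s.insert v (cd.getD v 0 + (chF.getD v []).foldl (fun a c => a + s.getD c 0) 0))
        sub).items
      = sub.items ++ pairsPostT cd t
  | .node v ch, sub => by
    intro hch hnd hfresh hknd
    rw [ordAT, List.reverse_cons, List.foldl_append]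
    have hch' : ∀ p ∈ chPairsL ch, chF.getD p.1 [] = p.2 := by
      intro p hp
      exact hch p (by rw [chPairsT]; exact List.mem_cons_of_mem _ hp)
    have hndL : (nodesL ch).Nodup := by
      rw [nodesT] at hnd; exact (List.nodup_cons.1 hnd).2
    have hvL : v ∉ nodesL ch := by
      rw [nodesT] at hnd; exact (List.nodup_cons.1 hnd).1
    have hfreshL : ∀ u ∈ nodesL ch, u ∉ sub.keys := by
      intro u hu
      exact hfresh u (by rw [nodesT]; exact List.mem_cons_of_mem _ hu)
    have hstep := pv_lemPL cd chF ch sub hch' hndL hfreshL hknd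
    set s' := (ordAL ch).reverse.foldl
        (fun s v => s.insert v (cd.getD v 0 + (chF.getD v []).foldl (fun a c => a + s.getD c 0) 0))
        sub with hs'
    have hkeys : s'.keys = sub.keys ++ (ordAL ch).reverse := by
      show s'.items.map Prod.fst = _
      rw [hstep, List.map_append, pv_keys_pairsPostL cd ch]
      rfl
    have hknd' : s'.keys.Nodup := by
      rw [hkeys, List.nodup_append]
      refine ⟨hknd, by
        rw [List.nodup_reverse]
        exact ((pv_perm_ordAL ch).nodup_iff).2 hndL, ?_⟩
      intro a ha b hb
      rintro rfl
      exact hfreshL a ((pv_mem_ordAL ch a).1 (List.mem_reverse.1 hb)) ha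
    have hvnotin : v ∉ s'.keys := by
      rw [hkeys, List.mem_append, List.mem_reverse]
      rintro (h | h)
      · exact hfresh v (by rw [nodesT]; exact List.mem_cons_self ..) h
      · exact hvL ((pv_mem_ordAL ch v).1 h)
    have hgetc : ∀ t', tslMem t' ch → s'.getD (rootT t') 0 = sumT cd t' := by
      intro t' ht'
      apply PySem.Dict.getD_of_mem_items
      · rw [PySem.Dict.items] at *
        rw [hstep, List.mem_append]
        exact Or.inr (pv_root_pair_memL cd ch t' ht')
      · exact hknd'
    have hval : cd.getD v 0 + (chF.getD v []).foldl (fun a c => a + s'.getD c 0) 0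
        = sumT cd (pvTS.node v ch) := by
      have : chF.getD v [] = rootsL ch :=
        hch (v, rootsL ch) (by rw [chPairsT]; exact List.mem_cons_self ..)
      rw [this, pv_sum_children cd s' ch 0 hgetc, sumT]
      ring
    rw [List.foldl_cons, List.foldl_nil, hval, PySem.Dict.items_insert_of_not_contains]
    · rw [hstep, pairsPostT, List.append_assoc]
    · rw [← Bool.not_eq_true, PySem.Dict.contains_iff_mem_keys]
      exact hvnotin
theorem pv_lemPL (cd : PySem.Dict Int Int) (chF : PySem.Dict Int (List Int)) :
    ∀ (ts : pvTSL) (sub : PySem.Dict Int Int),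
    (∀ p ∈ chPairsL ts, chF.getD p.1 [] = p.2) →
    (nodesL ts).Nodup →
    (∀ u ∈ nodesL ts, u ∉ sub.keys) →
    sub.keys.Nodup →
    ((ordAL ts).reverse.foldl
        (fun s v => s.insert v (cd.getD v 0 + (chF.getD v []).foldl (fun a c => a + s.getD c 0) 0))
        sub).items
      = sub.items ++ pairsPostL cd ts
  | .nil, sub => by
    intro _ _ _ _
    rw [ordAL, pairsPostL]
    simp
  | .cons t1 ts, sub => by
    intro hch hnd hfresh hknd
    rw [ordAL, List.reverse_append, List.foldl_append]
    set s1 := (ordAT t1).reverse.foldl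
        (fun s v => s.insert v (cd.getD v 0 + (chF.getD v []).foldl (fun a c => a + s.getD c 0) 0))
        sub with hs1
    have h1 : s1.items = sub.items ++ pairsPostT cd t1 :=
      pv_lemP cd chF t1 sub
        (fun p hp => hch p (by rw [chPairsL]; exact List.mem_append_right _ hp))
        (by rw [nodesL] at hnd; exact (List.nodup_append.1 hnd).1)
        (fun u hu => hfresh u (by rw [nodesL]; exact List.mem_append_left _ hu))
        hknd
    have hkeys1 : s1.keys = sub.keys ++ (ordAT t1).reverse := by
      show s1.items.map Prod.fst = _
      rw [h1, List.map_append, pv_keys_pairsPostT cd t1]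
      rfl
    have hdisj : ∀ u ∈ nodesT t1, u ∉ nodesL ts := by
      rw [nodesL] at hnd
      intro u hu1 hu2
      rcases List.nodup_append.1 hnd with ⟨_, _, hd⟩
      exact hd u hu1 u hu2 rfl
    have h2 := pv_lemPL cd chF ts s1
      (fun p hp => hch p (by rw [chPairsL]; exact List.mem_append_left _ hp))
      (by rw [nodesL] at hnd; exact (List.nodup_append.1 hnd).2.1)
      (by
        intro u hu
        rw [hkeys1, List.mem_append, List.mem_reverse]
        rintro (h | h)
        · exact hfresh u (by rw [nodesL]; exact List.mem_append_right _ hu) h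
        · exact hdisj u ((pv_mem_ordAT t1 u).1 h) hu)
      (by
        rw [hkeys1, List.nodup_append]
        refine ⟨hknd, by
          rw [List.nodup_reverse]
          exact ((pv_perm_ordAT t1).nodup_iff).2
            (by rw [nodesL] at hnd; exact (List.nodup_append.1 hnd).1), ?_⟩
        intro a ha b hb
        rintro rfl
        exact hfresh a (by
          rw [nodesL]
          exact List.mem_append_left _ ((pv_mem_ordAT t1 a).1 (List.mem_reverse.1 hb))) ha)
    rw [h2, h1, pairsPostL, List.append_assoc]
end


-- ---------- B's dfs computes the same sums and cuts ----------
mutual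
def cutsBT (cd : PySem.Dict Int Int) (total : Int) : pvTS → List Int
  | .node v ch => cutsBL cd total ch ++ [|total - 2 * sumT cd (.node v ch)|]
def cutsBL (cd : PySem.Dict Int Int) (total : Int) : pvTSL → List Int
  | .nil => []
  | .cons t ts => cutsBT cd total t ++ cutsBL cd total ts
end

def pvMergeTop (s : Int) : List (Int × List Int × Int) → List (Int × List Int × Int)
  | [] => []
  | (pn, prem, ps) :: r => (pn, prem, ps + s) :: r

mutual
def pvIterT (edges : List (Int × Int)) : pvTS → Nat
  | .node v ch => (pvAdjL edges v : List Int).length + 1 + pvIterL edges ch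
def pvIterL (edges : List (Int × Int)) : pvTSL → Nat
  | .nil => 0
  | .cons t ts => pvIterT edges t + pvIterL edges ts
end

theorem pv_loopB_nil (em : PySem.Dict Int (PySem.Set Int)) (cd : PySem.Dict Int Int)
    (total : Int) (f : Nat) (vis : PySem.Set Int) (best : Option Int) :
    pvLoopB em cd total f [] vis best = best := by
  cases f <;> rw [pvLoopB]

mutual
theorem pv_lemBT (edges : List (Int × Int)) (cd : PySem.Dict Int Int) (total : Int)
    (t : pvTS) :
    ∀ (po : Option Int) (f : Nat) (rest : List (Int × List Int × Int))
      (vis : PySem.Set Int) (best : Option Int),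
    RepT edges po t → (nodesT t).Nodup →
    (∀ u ∈ nodesT t, u ≠ rootT t → u ∉ vis) →
    rootT t ∈ vis →
    (∀ u, po = some u → u ∈ vis) →
    pvLoopB (pvEdgeMap edges) cd total (f + pvIterT edges t)
        ((rootT t, (pvAdjL edges (rootT t) : List Int), cd.getD (rootT t) 0) :: rest) vis best
      = pvLoopB (pvEdgeMap edges) cd total f (pvMergeTop (sumT cd t) rest)
          ((ordBT t).foldl PySem.Set.add vis)
          ((cutsBT cd total t).foldl pvBestUpd best) := by
    match t with
    | .node v ch =>
      intro po f rest vis best hrep hnd hvis hv hpar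
      simp only [rootT] at hvis hv ⊢
      rw [show f + pvIterT edges (pvTS.node v ch)
          = f + ((pvAdjL edges v : List Int).length + 1 + pvIterL edges ch) from by
        rw [pvIterT]]
      rw [pv_lemBLp edges cd total ch (pvAdjL edges v) v po f (cd.getD v 0) rest vis best
        hrep.2
        (by rw [nodesT] at hnd; exact (List.nodup_cons.1 hnd).2)
        (by
          intro u hu
          refine hvis u (by rw [nodesT]; exact List.mem_cons_of_mem _ hu) ?_
          rintro rfl
          rw [nodesT] at hnd
          exact (List.nodup_cons.1 hnd).1 hu)
        hrep.1
        (by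
          intro u _ hcase
          rcases hcase with rfl | h
          · exact hv
          · exact hpar u h)
        hv]
      rw [ordBT, List.foldl_cons, PySem.Set.add_of_mem hv, cutsBT, List.foldl_append, sumT,
        List.foldl_cons, List.foldl_nil]
termination_by (sizeOf t, 0)

theorem pv_lemBLp (edges : List (Int × Int)) (cd : PySem.Dict Int Int) (total : Int)
    (ts : pvTSL) (l : List Int) :
    ∀ (v : Int) (po : Option Int) (f : Nat) (s : Int) (rest : List (Int × List Int × Int))
      (vis : PySem.Set Int) (best : Option Int),
    RepL edges v ts → (nodesL ts).Nodup →
    (∀ u ∈ nodesL ts, u ∉ vis) →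
    (l.filter (fun u => !(u == v || po == some u)) = rootsL ts) →
    (∀ u ∈ l, (u = v ∨ po = some u) → u ∈ vis) →
    v ∈ vis →
    pvLoopB (pvEdgeMap edges) cd total (f + (l.length + 1 + pvIterL edges ts))
        ((v, l, s) :: rest) vis best
      = pvLoopB (pvEdgeMap edges) cd total f (pvMergeTop (s + sumL cd ts) rest)
          ((ordBL ts).foldl PySem.Set.add vis)
          (pvBestUpd ((cutsBL cd total ts).foldl pvBestUpd best)
            |total - 2 * (s + sumL cd ts)|) := by
    match l with
    | [] =>
      intro v po f s rest vis best hrep hnd hvis hfilt hskip hv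
      rw [List.filter_nil] at hfilt
      have hts : ts = .nil := by
        cases ts with
        | nil => rfl
        | cons t ts => rw [rootsL] at hfilt; cases hfilt
      subst hts
      rw [show f + (([] : List Int).length + 1 + pvIterL edges pvTSL.nil) = f + 1 from by
        rw [pvIterL]; simp]
      rw [sumL, ordBL, cutsBL]
      have hone : ∀ (g : Nat) (r : List (Int × List Int × Int)),
          pvLoopB (pvEdgeMap edges) cd total (g + 1) ((v, ([] : List Int), s) :: r) vis best
            = pvLoopB (pvEdgeMap edges) cd total g (pvMergeTop s r) vis
                (pvBestUpd best |total - 2 * s|) := by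
        intro g r
        cases r with
        | nil => rw [pvLoopB, pvMergeTop]
        | cons fr r' =>
          obtain ⟨pn, prem, ps⟩ := fr
          rw [pvLoopB, pvMergeTop]
      rw [hone f rest]
      rw [List.foldl_nil]
      norm_num
    | u :: l' =>
      intro v po f s rest vis best hrep hnd hvis hfilt hskip hv
      by_cases hpred : (u = v ∨ po = some u)
      · have humem : u ∈ vis := hskip u (List.mem_cons_self ..) hpred
        have hpredb : (!(u == v || po == some u)) = false := by
          rcases hpred with rfl | h
          · simp
          · simp [h]
        rw [List.filter_cons, hpredb] at hfilt
        rw [if_neg Bool.false_ne_true] at hfilt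
        have hcont : PySem.Set.contains vis u = true := (PySem.Set.contains_iff _ _).2 humem
        rw [show f + ((u :: l').length + 1 + pvIterL edges ts)
            = (f + (l'.length + 1 + pvIterL edges ts)) + 1 from by
          rw [List.length_cons]; omega]
        rw [pvLoopB, if_pos hcont]
        exact pv_lemBLp edges cd total ts l' v po f s rest vis best hrep hnd hvis hfilt
          (fun x hx => hskip x (List.mem_cons_of_mem _ hx)) hv
      · have hpredb : (!(u == v || po == some u)) = true := by
          push_neg at hpred
          simp [hpred.1, hpred.2]
        rw [List.filter_cons, hpredb, if_pos rfl] at hfilt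
        match ts, hrep, hnd, hvis, hfilt with
        | .cons (.node c ch1) ts2, hrep, hnd, hvis, hfilt =>
          rw [rootsL] at hfilt
          obtain ⟨hu1, hfilt'⟩ := List.cons_eq_cons.1 hfilt
          rw [rootT] at hu1
          have hunv : u ∉ vis := by
            rw [hu1]
            exact hvis _ (by
              rw [nodesL, nodesT]
              exact List.mem_append_left _ (List.mem_cons_self ..))
          have hcont : PySem.Set.contains vis u = false := by
            rw [← Bool.not_eq_true]
            intro h
            exact hunv ((PySem.Set.contains_iff _ _).1 h)
          rw [show f + ((u :: l').length + 1 + pvIterL edges (pvTSL.cons (pvTS.node c ch1) ts2))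
              = ((f + (l'.length + 1 + pvIterL edges ts2)) + pvIterT edges (pvTS.node c ch1)) + 1
              from by rw [List.length_cons, pvIterL]; omega]
          rw [pvLoopB, if_neg (by rw [hcont]; exact Bool.false_ne_true)]
          rw [hu1]
          have hdisj : ∀ x ∈ nodesT (pvTS.node c ch1), x ∉ nodesL ts2 := by
            rw [nodesL] at hnd
            intro x hx1 hx2
            rcases List.nodup_append.1 hnd with ⟨_, _, hd⟩
            exact hd x hx1 x hx2 rfl
          have hT := pv_lemBT edges cd total (pvTS.node c ch1) (some v)
            (f + (l'.length + 1 + pvIterL edges ts2)) ((v, l', s) :: rest)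
            (PySem.Set.add vis c) best hrep.1
            (by rw [nodesL] at hnd; exact (List.nodup_append.1 hnd).1)
            (by
              intro x hx hxc
              rw [rootT] at hxc
              rw [PySem.Set.mem_add]
              rintro (h | rfl)
              · exact hvis x (by rw [nodesL]; exact List.mem_append_left _ hx) h
              · exact hxc rfl)
            (by rw [rootT, PySem.Set.mem_add]; exact Or.inr rfl)
            (by
              intro x hx
              obtain rfl := Option.some.inj hx
              rw [PySem.Set.mem_add]
              exact Or.inl hv)
          rw [rootT] at hT
          rw [show ((pvEdgeMap edges).getD c PySem.Set.empty : PySem.Set Int)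
              = pvAdjL edges c from rfl]
          rw [hT, pvMergeTop]
          have hvisc : ∀ x, x ∈ (ordBT (pvTS.node c ch1)).foldl PySem.Set.add (PySem.Set.add vis c)
              ↔ x ∈ vis ∨ x ∈ ordBT (pvTS.node c ch1) := by
            intro x
            rw [pv_mem_foldl_add, PySem.Set.mem_add]
            constructor
            · rintro ((h | rfl) | h)
              · exact Or.inl h
              · exact Or.inr (by rw [ordBT]; exact List.mem_cons_self ..)
              · exact Or.inr h
            · rintro (h | h)
              · exact Or.inl (Or.inl h)
              · exact Or.inr h
          have hrec := pv_lemBLp edges cd total ts2 l' v po f (s + sumT cd (pvTS.node c ch1))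
            rest ((ordBT (pvTS.node c ch1)).foldl PySem.Set.add (PySem.Set.add vis c))
            ((cutsBT cd total (pvTS.node c ch1)).foldl pvBestUpd best)
            hrep.2
            (by rw [nodesL] at hnd; exact (List.nodup_append.1 hnd).2.1)
            (by
              intro x hx
              rw [hvisc]
              rintro (h | h)
              · exact hvis x (by rw [nodesL]; exact List.mem_append_right _ hx) h
              · exact hdisj x ((pv_mem_ordBT _ x).1 h) hx)
            hfilt'
            (fun x hx hc => (hvisc x).2 (Or.inl (hskip x (List.mem_cons_of_mem _ hx) hc)))
            ((hvisc v).2 (Or.inl hv))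
          rw [hrec]
          have hsum : s + sumT cd (pvTS.node c ch1) + sumL cd ts2
              = s + sumL cd (pvTSL.cons (pvTS.node c ch1) ts2) := by
            rw [sumL]; ring
          have hvis3 : (ordBL ts2).foldl PySem.Set.add
                ((ordBT (pvTS.node c ch1)).foldl PySem.Set.add (PySem.Set.add vis c))
              = (ordBL (pvTSL.cons (pvTS.node c ch1) ts2)).foldl PySem.Set.add vis := by
            rw [ordBL, List.foldl_append, ordBT, List.foldl_cons, List.foldl_cons,
              PySem.Set.add_of_mem (by rw [PySem.Set.mem_add]; exact Or.inr rfl)]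
          rw [hsum, hvis3, cutsBL, List.foldl_append]
termination_by (sizeOf ts, l.length)
end



-- ---------- bridges ----------
theorem pv_loopA_nil (em : PySem.Dict Int (PySem.Set Int)) (f : Nat) (vis : PySem.Set Int)
    (ord : List Int) (ch : PySem.Dict Int (List Int)) :
    pvLoopA em f [] vis ord ch = (vis, ord, ch) := by
  cases f <;> rw [pvLoopA]

mutual
theorem pv_keys_chPairsT : ∀ (t : pvTS), (chPairsT t).map Prod.fst = ordAT t
  | .node v ch => by rw [chPairsT, ordAT, List.map_cons, pv_keys_chPairsL ch]
theorem pv_keys_chPairsL : ∀ (ts : pvTSL), (chPairsL ts).map Prod.fst = ordAL ts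
  | .nil => by rw [chPairsL, ordAL]; rfl
  | .cons t ts => by
    rw [chPairsL, ordAL, List.map_append, pv_keys_chPairsT t, pv_keys_chPairsL ts]
end

theorem pv_chF_getD (t : pvTS) (hnd : (nodesT t).Nodup) :
    ∀ p ∈ chPairsT t,
      ((chPairsT t).foldl (fun d p => d.insert p.1 p.2) PySem.Dict.empty).getD p.1 [] = p.2 := by
  have hknd : ((chPairsT t).map (fun p : Int × List Int => p.1)).Nodup := by
    rw [show (fun p : Int × List Int => p.1) = Prod.fst from rfl, pv_keys_chPairsT t]
    exact ((pv_perm_ordAT t).nodup_iff).2 hnd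
  have hitems : ((chPairsT t).foldl (fun d p => d.insert p.1 p.2) PySem.Dict.empty).items
      = chPairsT t := by
    have := PySem.Dict.items_foldl_insert_fresh (l := chPairsT t)
      (k := fun p : Int × List Int => p.1) (v := fun p : Int × List Int => p.2)
      (d := PySem.Dict.empty) (by intro a _; rw [PySem.Dict.contains_empty]) hknd
    simpa using this
  intro p hp
  apply PySem.Dict.getD_of_mem_items
  · rw [hitems]; exact (by simpa using hp)
  · show ((chPairsT t).foldl (fun d p => d.insert p.1 p.2) PySem.Dict.empty).items.map _ |>.Nodup
    rw [hitems]
    exact hknd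

mutual
theorem pv_map_pairsPostT (cd : PySem.Dict Int Int) (total : Int) :
    ∀ (t : pvTS), (pairsPostT cd t).map (fun p => |total - 2 * p.2|) = cutsBT cd total t
  | .node v ch => by
    rw [pairsPostT, cutsBT, List.map_append, pv_map_pairsPostL cd total ch]
    rfl
theorem pv_map_pairsPostL (cd : PySem.Dict Int Int) (total : Int) :
    ∀ (ts : pvTSL), (pairsPostL cd ts).map (fun p => |total - 2 * p.2|) = cutsBL cd total ts
  | .nil => by rw [pairsPostL, cutsBL]; rfl
  | .cons t ts => by
    rw [pairsPostL, cutsBL, List.map_append, pv_map_pairsPostT cd total t,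
      pv_map_pairsPostL cd total ts]
end

theorem pv_foldl_min_some : ∀ (t : List Int) (x : Int),
    t.foldl pvBestUpd (some x) = some (t.foldl min x) := by
  intro t
  induction t with
  | nil => intro x; rfl
  | cons y t ih =>
    intro x
    rw [List.foldl_cons, List.foldl_cons]
    have : pvBestUpd (some x) y = some (min x y) := by
      rw [pvBestUpd]
      by_cases h : y < x
      · rw [if_pos h]
        congr 1
        omega
      · rw [if_neg h]
        congr 1
        omega
    rw [this, ih]

theorem pv_fold_min (l : List Int) :
    l.foldl pvBestUpd none = PySem.List.min? l (fun y => y) := by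
  cases l with
  | nil => rfl
  | cons x t =>
    rw [PySem.List.min?_id_cons, List.foldl_cons]
    exact pv_foldl_min_some t x

-- ---------- size bounds ----------
theorem pv_layer_endpoints (edges : List (Int × Int)) :
    ∀ (k : Nat) (u : Int), u ∈ pvLayer edges k → u = 1 ∨ ∃ p ∈ edges, u = p.1 ∨ u = p.2 := by
  intro k
  induction k with
  | zero => intro u hu; exact Or.inl ((pv_mem_layer_zero edges).1 hu)
  | succ k ih =>
    intro u hu
    rcases (pv_mem_layer_succ edges k u).1 hu with h | ⟨w, _, hadj⟩
    · exact ih u h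
    · rcases (pv_mem_adjL edges w u).1 hadj with h | h
      · exact Or.inr ⟨(w, u), h, Or.inr rfl⟩
      · exact Or.inr ⟨(u, w), h, Or.inl rfl⟩

theorem pv_flatMap_len : ∀ (l : List (Int × Int)),
    (l.flatMap (fun p => [p.1, p.2])).length = 2 * l.length := by
  intro l
  induction l with
  | nil => rfl
  | cons p l ih => simp [List.flatMap_cons, ih]; omega

theorem pv_sub_nodup_len {l m : List Int} (hnd : l.Nodup) (hsub : ∀ u ∈ l, u ∈ m) :
    l.length ≤ m.length := by
  calc l.length = l.toFinset.card := (List.toFinset_card_of_nodup hnd).symm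
    _ ≤ m.toFinset.card := Finset.card_le_card (by
        intro a ha
        rw [List.mem_toFinset] at ha ⊢
        exact hsub a ha)
    _ ≤ m.length := List.toFinset_card_le m

theorem pv_reach_len (edges : List (Int × Int)) :
    (pvReach edges).length ≤ 2 * edges.length + 1 := by
  have h := pv_sub_nodup_len (pv_layer_nodup edges (2 * edges.length + 2))
    (m := 1 :: edges.flatMap (fun p => [p.1, p.2])) (by
      intro u hu
      rcases pv_layer_endpoints edges _ u hu with rfl | ⟨p, hp, h⟩
      · exact List.mem_cons_self ..
      · refine List.mem_cons_of_mem _ ?_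
        rw [List.mem_flatMap]
        exact ⟨p, hp, by rcases h with rfl | rfl <;> simp⟩)
  rw [List.length_cons, pv_flatMap_len] at h
  exact (by simpa [pvReach] using h)

mutual
theorem pv_iter_le (edges : List (Int × Int)) (D : Nat) :
    ∀ (t : pvTS), (∀ w ∈ nodesT t, (pvAdjL edges w : List Int).length ≤ D) →
      pvIterT edges t ≤ (nodesT t).length * (D + 2)
  | .node v ch, h => by
    rw [pvIterT, nodesT, List.length_cons]
    have h1 := pv_iterL_le edges D ch (fun w hw =>
      h w (by rw [nodesT]; exact List.mem_cons_of_mem _ hw))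
    have h2 := h v (by rw [nodesT]; exact List.mem_cons_self ..)
    have : ((nodesL ch).length + 1) * (D + 2) = (nodesL ch).length * (D + 2) + (D + 2) := by ring
    omega
theorem pv_iterL_le (edges : List (Int × Int)) (D : Nat) :
    ∀ (ts : pvTSL), (∀ w ∈ nodesL ts, (pvAdjL edges w : List Int).length ≤ D) →
      pvIterL edges ts ≤ (nodesL ts).length * (D + 2)
  | .nil, _ => by rw [pvIterL, nodesL]; simp
  | .cons t ts, h => by
    rw [pvIterL, nodesL, List.length_append]
    have h1 := pv_iter_le edges D t (fun w hw =>
      h w (by rw [nodesL]; exact List.mem_append_left _ hw))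
    have h2 := pv_iterL_le edges D ts (fun w hw =>
      h w (by rw [nodesL]; exact List.mem_append_right _ hw))
    have : ((nodesT t).length + (nodesL ts).length) * (D + 2)
        = (nodesT t).length * (D + 2) + (nodesL ts).length * (D + 2) := by ring
    omega
end

-- ---------- final assembly ----------
theorem pv_main (n : Int) (costs : List (Int × Int)) (edges : List (Int × Int))
    (hpre : Pre_tree_cut n costs edges) :
    tree_cut n costs edges = tree_cut_alt n costs edges := by
  obtain ⟨-, hpre'⟩ := hpre
  have hpo0 : ∀ u ∈ pvAdjL edges (1 : Int),
      ((none : Option Int) = some u ↔ pvDist edges u + 1 = pvDist edges 1) := by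
    intro u hu
    constructor
    · intro h; cases h
    · intro h; rw [pv_dist_one] at h; omega
  obtain ⟨hrep, hnd, hchain⟩ := pv_build_good edges hpre' (2 * edges.length + 2) 1 none
    (pv_one_mem_reach edges) (by rw [pv_dist_one]) hpo0
  set t0 := buildT edges (2 * edges.length + 2) 1 with ht0
  have hroot : rootT t0 = 1 := pv_rootT_buildT edges _ 1
  have hlen : (nodesT t0).length ≤ 2 * edges.length + 1 :=
    le_trans (pv_sub_nodup_len hnd (fun u hu => (hchain u hu).1)) (pv_reach_len edges)
  have hvis0 : ∀ u ∈ nodesT t0, u ∉ (PySem.Set.empty : PySem.Set Int) := by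
    intro u _ h
    simp [PySem.Set.empty] at h
  have hpo0' : ∀ u ∈ pvAdjL edges (rootT t0),
      (u ∈ (PySem.Set.empty : PySem.Set Int) ↔ (none : Option Int) = some u) := by
    intro u _
    constructor
    · intro h; simp [PySem.Set.empty] at h
    · intro h; cases h
  set cd := PySem.Dict.mk costs with hcd
  set total := cd.values.foldl (fun a b => a + b) 0 with htotal
  -- A's traversal
  have hle : (nodesT t0).length ≤ (2 * edges.length + 3) * (2 * edges.length + 3) := by
    calc (nodesT t0).length ≤ 2 * edges.length + 1 := hlen
      _ ≤ (2 * edges.length + 3) * 1 := by omega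
      _ ≤ (2 * edges.length + 3) * (2 * edges.length + 3) :=
          Nat.mul_le_mul_left _ (by omega)
  have hstack : pvLoopA (pvEdgeMap edges) ((2 * edges.length + 3) * (2 * edges.length + 3))
      [1] PySem.Set.empty [] PySem.Dict.empty
      = ((ordAT t0).foldl PySem.Set.add PySem.Set.empty, [] ++ ordAT t0,
          (chPairsT t0).foldl (fun d p => d.insert p.1 p.2) PySem.Dict.empty) := by
    rw [show ((2 * edges.length + 3) * (2 * edges.length + 3))
        = ((2 * edges.length + 3) * (2 * edges.length + 3) - (nodesT t0).length)
            + (nodesT t0).length from by omega]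
    rw [show ([1] : List Int) = rootT t0 :: [] from by rw [hroot]]
    rw [pv_lemA edges t0 none _ [] PySem.Set.empty [] PySem.Dict.empty hrep hnd hvis0 hpo0']
    exact pv_loopA_nil _ _ _ _ _
  have hsubdict : (pvSubCosts cd
      ((chPairsT t0).foldl (fun d p => d.insert p.1 p.2) PySem.Dict.empty) (ordAT t0)).items
      = pairsPostT cd t0 := by
    rw [pvSubCosts]
    rw [pv_lemP cd _ t0 PySem.Dict.empty (pv_chF_getD t0 hnd) hnd
      (by intro u _ h; simp [PySem.Dict.keys, PySem.Dict.empty] at h)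
      (by simp [PySem.Dict.keys, PySem.Dict.empty])]
    simp [PySem.Dict.empty]
  -- B's dfs
  have hdeg : ∀ w ∈ nodesT t0, (pvAdjL edges w : List Int).length ≤ 2 * edges.length + 1 := by
    intro w hw
    exact le_trans (pv_sub_nodup_len (pv_adjL_nodup edges w)
      (fun u hu => hpre'.1 w (hchain w hw).1 u hu)) (pv_reach_len edges)
  have hiter : pvIterT edges t0 ≤ (2 * edges.length + 3) * (2 * edges.length + 3) := by
    calc pvIterT edges t0 ≤ (nodesT t0).length * ((2 * edges.length + 1) + 2) :=
        pv_iter_le edges _ t0 hdeg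
      _ ≤ (2 * edges.length + 1) * (2 * edges.length + 3) := Nat.mul_le_mul_right _ hlen
      _ ≤ (2 * edges.length + 3) * (2 * edges.length + 3) :=
        Nat.mul_le_mul_right _ (by omega)
  have hB : pvLoopB (pvEdgeMap edges) cd total
      ((2 * edges.length + 3) * (2 * edges.length + 3))
      [(1, ((pvEdgeMap edges).getD 1 PySem.Set.empty : List Int), cd.getD 1 0)]
      (PySem.Set.add PySem.Set.empty 1) none
      = (cutsBT cd total t0).foldl pvBestUpd none := by
    rw [show ((2 * edges.length + 3) * (2 * edges.length + 3))
        = ((2 * edges.length + 3) * (2 * edges.length + 3) - pvIterT edges t0)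
            + pvIterT edges t0 from by omega]
    rw [show ((pvEdgeMap edges).getD 1 PySem.Set.empty : PySem.Set Int)
        = pvAdjL edges 1 from rfl]
    rw [show (1 : Int) = rootT t0 from hroot.symm]
    rw [pv_lemBT edges cd total t0 none _ []
      (PySem.Set.add PySem.Set.empty (rootT t0)) none hrep hnd
      (by
        intro u _ hne h
        rw [PySem.Set.mem_add] at h
        rcases h with h | h
        · simp [PySem.Set.empty] at h
        · exact hne h)
      (by rw [PySem.Set.mem_add]; exact Or.inr rfl)
      (by intro u h; cases h)]
    rw [pvMergeTop]
    exact pv_loopB_nil _ _ _ _ _ _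
  show tree_cut n costs edges = tree_cut_alt n costs edges
  rw [tree_cut, tree_cut_alt]
  rw [hstack, hB, ← hcd, ← htotal]
  show (match PySem.List.min? (((pvSubCosts cd
      ((chPairsT t0).foldl (fun d p => d.insert p.1 p.2) PySem.Dict.empty)
      ([] ++ ordAT t0)).values).map (fun s => |total - 2 * s|)) (fun x => x) with
    | some m => m
    | none => 0)
    = (match (cutsBT cd total t0).foldl pvBestUpd none with
    | some b => b
    | none => 0)
  rw [List.nil_append]
  rw [show (pvSubCosts cd
      ((chPairsT t0).foldl (fun d p => d.insert p.1 p.2) PySem.Dict.empty)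
      (ordAT t0)).values
      = (pvSubCosts cd
      ((chPairsT t0).foldl (fun d p => d.insert p.1 p.2) PySem.Dict.empty)
      (ordAT t0)).items.map (fun p => p.2) from rfl]
  rw [hsubdict, List.map_map]
  rw [show ((fun s => |total - 2 * s|) ∘ (fun p : Int × Int => p.2))
      = (fun p : Int × Int => |total - 2 * p.2|) from rfl]
  rw [pv_map_pairsPostT cd total t0]
  rw [← pv_fold_min]

-- ===== VERDICT (by name: the statement is the Claim_ definition above) =====
theorem tree_cut_spec : Claim_equal_tree_cut := by
  intro n costs edges _ hpre
  show tree_cut n costs edges = tree_cut_alt n costs edges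
  exact pv_main n costs edges hpre
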